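-- pv_equiv track=rewrite | github.com/ADi2991/crawler | search_engine.py | get_alternate_queries
-- ===== SOURCE A (Python) =====
-- def get_alternate_queries(query_words, thesaurus):
--     queries = []
--
--     def thesaurus_expander(query_words, current_query):
--         current_word = query_words[0]
--         words_to_try = []
--         if current_word in thesaurus:
--             words_to_try = list(thesaurus[current_word])
--         words_to_try.insert(0, current_word)
--         for word in words_to_try:
--             if current_query != '':
--                 new_query = current_query+' '+word
--             else:
--                 new_query = current_query + word
--             if len(query_words)>1:
--                 thesaurus_expander(query_words[1:], new_query)
--             else:
--                 queries.append(new_query)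
--     thesaurus_expander(query_words, '')
--     for query in queries:
--         yield query
-- ===== SOURCE B (Python) =====
-- def get_alternate_queries(query_words, thesaurus):
--     # Iterative cross-product: expand prefixes level by level instead of recursing.
--     combos = ['']
--     for word in query_words:
--         options = [word] + (list(thesaurus[word]) if word in thesaurus else [])
--         combos = [(c + ' ' + w if c != '' else c + w) for c in combos for w in options]
--     for q in combos:
--         yield q
-- ===== Notes on version B (the rewrite author's own statement) =====
-- stated objective: simpler
-- what changed: Replaced the depth-first recursion with a mutable accumulator list by an iterative level-by-level cross-product fold over the words.
import Mathlib
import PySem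

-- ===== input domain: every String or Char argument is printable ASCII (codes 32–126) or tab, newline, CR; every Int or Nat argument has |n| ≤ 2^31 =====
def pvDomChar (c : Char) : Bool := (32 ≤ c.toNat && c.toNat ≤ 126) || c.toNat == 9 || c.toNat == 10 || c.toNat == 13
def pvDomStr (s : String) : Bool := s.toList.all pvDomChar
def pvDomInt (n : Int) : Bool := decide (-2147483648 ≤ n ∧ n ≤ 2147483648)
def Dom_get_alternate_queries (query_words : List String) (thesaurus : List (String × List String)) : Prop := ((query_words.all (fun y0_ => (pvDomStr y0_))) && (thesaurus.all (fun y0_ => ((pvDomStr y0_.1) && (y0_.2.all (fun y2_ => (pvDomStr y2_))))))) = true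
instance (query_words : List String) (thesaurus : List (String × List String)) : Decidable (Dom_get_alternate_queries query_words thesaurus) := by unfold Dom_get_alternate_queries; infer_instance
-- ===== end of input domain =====

-- B replaces A's depth-first recursion (mutable accumulator) by an iterative
-- level-by-level cross-product fold over the words (simpler decomposition; same cost).


-- ===== PORT A =====
-- thesaurus_expander: recursion is structural on the tail of query_words (head passed separately,
-- since A indexes query_words[0] which exists exactly when the list is non-empty).
def pvExpander (thesaurus : List (String × List String)) :
    List String → String → String → List String
  | rest, current_word, current_query =>
    let words_to_try :=
      current_word ::
        (match thesaurus.lookup current_word with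
         | some l => l
         | none => [])
    words_to_try.foldl
      (fun queries word =>
        let new_query :=
          if current_query ≠ "" then current_query ++ " " ++ word
          else current_query ++ word
        match rest with
        | r :: rs => queries ++ pvExpander thesaurus rs r new_query
        | [] => queries ++ [new_query])
      []

def get_alternate_queries (query_words : List String) (thesaurus : List (String × List String)) : List String :=
  match query_words with
  | [] => []   -- unreachable under Pre_: Python raises IndexError here
  | w :: rest => pvExpander thesaurus rest w ""

-- ===== PORT B =====
-- extend a prefix query with one more word (Python's conditional space join)
def pvExt (c w : String) : String :=
  if c ≠ "" then c ++ " " ++ w else c ++ w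

def get_alternate_queries_alt (query_words : List String) (thesaurus : List (String × List String)) : List String :=
  query_words.foldl
    (fun combos word =>
      let options :=
        word ::
          (match thesaurus.lookup word with
           | some l => l
           | none => [])
      combos.flatMap (fun c => options.map (fun w => pvExt c w)))
    [""]

-- ===== PRECONDITION & SPEC =====
-- Pre_ excludes only the empty word list, on which Python A raises IndexError.
def Pre_get_alternate_queries (query_words : List String) (thesaurus : List (String × List String)) : Prop :=
  query_words ≠ []
instance (query_words : List String) (thesaurus : List (String × List String)) : Decidable (Pre_get_alternate_queries query_words thesaurus) := by unfold Pre_get_alternate_queries; infer_instance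

def pvWitness_get_alternate_queries : List String × (List (String × List String)) :=
  (["big", "cat"], [("big", ["large", "huge"]), ("cat", ["feline"])])

def Spec_get_alternate_queries (query_words : List String) (thesaurus : List (String × List String)) (out : List String) : Prop := out = get_alternate_queries_alt query_words thesaurus
instance (query_words : List String) (thesaurus : List (String × List String)) (out : List String) : Decidable (Spec_get_alternate_queries query_words thesaurus out) := by unfold Spec_get_alternate_queries; infer_instance

-- ===== CLAIM (what is proved, stated in full; the proofs are below) =====
def Claim_equal_get_alternate_queries : Prop := ∀ (query_words : List String) (thesaurus : List (String × List String)), Dom_get_alternate_queries query_words thesaurus → Pre_get_alternate_queries query_words thesaurus → Spec_get_alternate_queries query_words thesaurus (get_alternate_queries query_words thesaurus)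


-- ===== LEMMAS AND PROOFS =====

-- the per-word option list, shared shape of both ports
def pvOpts (thesaurus : List (String × List String)) (w : String) : List String :=
  w :: (match thesaurus.lookup w with | some l => l | none => [])

-- one level of B's fold
def pvStep (thesaurus : List (String × List String)) (combos : List String) (word : String) : List String :=
  combos.flatMap (fun c => (pvOpts thesaurus word).map (fun w => pvExt c w))

lemma step_singleton (thes : List (String × List String)) (c w : String) :
    pvStep thes [c] w = (pvOpts thes w).map (fun y => pvExt c y) := by
  simp [pvStep]

lemma alt_eq_foldl (qws : List String) (thes : List (String × List String)) :
    get_alternate_queries_alt qws thes = qws.foldl (pvStep thes) [""] := rfl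

-- B's fold from a list of seeds splits over the seeds
lemma foldl_step_flat (thes : List (String × List String)) :
    ∀ (ls : List String) (xs : List String),
      ls.foldl (pvStep thes) xs = xs.flatMap (fun s => ls.foldl (pvStep thes) [s]) := by
  intro ls
  induction ls with
  | nil => intro xs; simp
  | cons w ls ih =>
    intro xs
    simp only [List.foldl_cons]
    rw [ih (pvStep thes xs w)]
    show (xs.flatMap fun c => (pvOpts thes w).map fun y => pvExt c y).flatMap _ = _
    rw [List.flatMap_assoc]
    congr 1
    funext c
    rw [List.flatMap_map, ih (pvStep thes [c] w), step_singleton, List.flatMap_map]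

-- A's recursion equals B's fold started from the current prefix
lemma expander_eq (thes : List (String × List String)) :
    ∀ (rest : List String) (w cur : String),
      pvExpander thes rest w cur = (w :: rest).foldl (pvStep thes) [cur] := by
  intro rest
  induction rest with
  | nil =>
    intro w cur
    rw [pvExpander]
    simp only [PySem.List.foldl_append_singleton_eq_map, List.nil_append,
      List.foldl_cons, List.foldl_nil, step_singleton]
    simp [pvOpts, pvExt]
  | cons r rs ih =>
    intro w cur
    rw [pvExpander]
    simp only [PySem.List.foldl_append_eq_flatMap, List.nil_append]
    rw [List.foldl_cons, foldl_step_flat thes (r :: rs) (pvStep thes [cur] w),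
      step_singleton, List.flatMap_map]
    congr 1
    funext word
    have h : (if cur ≠ "" then cur ++ " " ++ word else cur ++ word) = pvExt cur word := rfl
    rw [h, ih r (pvExt cur word)]

-- ===== VERDICT (by name: the statement is the Claim_ definition above) =====
theorem get_alternate_queries_spec : Claim_equal_get_alternate_queries := by
  intro qws thes _ hpre
  unfold Spec_get_alternate_queries
  match qws with
  | [] => exact absurd rfl hpre
  | w :: rest =>
    rw [alt_eq_foldl]
    show pvExpander thes rest w "" = _
    exact expander_eq thes rest w ""
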